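-- pv_equiv track=rewrite | github.com/yeatonj/adventOfCode2015 | day5/NaughtyOrNiceString.py | pt2_naughty_check
-- ===== SOURCE A (Python) =====
-- def pt2_naughty_check(line_in):
--     letter_pair = False
--     skip_letter = False
--     prev_word = ""
--     double_dict = {}
--     for i in range(len(line_in) - 1):
--         # Check for the first condition
--         temp_word = line_in[i] + line_in[i+1]
--         if not letter_pair and temp_word != prev_word:
--             num = double_dict.setdefault(temp_word, 0)
--             if num > 0:
--                 letter_pair = True
--             else:
--                 double_dict.update({temp_word:num + 1})
--         elif (temp_word == prev_word):
--             temp_word = ""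
--         prev_word = temp_word
--         # check for the second condition
--         if not skip_letter and i < len(line_in) - 2:
--             if line_in[i] == line_in[i+2]:
--                 skip_letter = True
--     return not (letter_pair and skip_letter)
-- ===== SOURCE B (Python) =====
-- def pt2_naughty_check(line_in):
--     n = len(line_in)
--     rule1 = any(line_in[i:i + 2] in line_in[i + 2:] for i in range(n - 1))
--     rule2 = any(line_in[i] == line_in[i + 2] for i in range(n - 2))
--     return not (rule1 and rule2)
-- ===== Notes on version B (the rewrite author's own statement) =====
-- stated objective: simpler
-- what changed: Replaced the fused single-pass loop with dict bookkeeping and pair-blanking by two independent idiomatic scans: a substring search line_in[i:i+2] in line_in[i+2:] for the non-overlapping repeated pair, and an any() over i for the sandwich letter.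
import Mathlib
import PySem

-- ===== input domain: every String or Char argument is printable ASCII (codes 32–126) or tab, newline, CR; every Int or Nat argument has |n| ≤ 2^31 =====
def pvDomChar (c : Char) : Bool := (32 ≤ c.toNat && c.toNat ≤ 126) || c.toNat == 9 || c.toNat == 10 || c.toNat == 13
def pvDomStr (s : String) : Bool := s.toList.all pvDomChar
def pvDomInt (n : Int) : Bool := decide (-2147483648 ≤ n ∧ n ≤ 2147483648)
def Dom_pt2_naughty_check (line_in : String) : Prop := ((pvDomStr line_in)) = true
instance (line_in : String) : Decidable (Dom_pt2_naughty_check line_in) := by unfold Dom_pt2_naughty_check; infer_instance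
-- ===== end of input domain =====

-- B replaces A's fused single-pass loop (dict bookkeeping + pair blanking) by two independent
-- idiomatic scans (substring search for the repeated pair, any() for the sandwich letter); simpler, same results.

-- ===== PORT A =====
def pt2_naughty_check (line_in : String) : Bool :=
  let cs := line_in.toList
  let n : Int := cs.length
  let st := (PySem.List.pyRange 0 (n - 1) 1).foldl
    (fun st i =>
      let (letter_pair, prev_word, double_dict) := st.1
      let skip_letter := st.2
      -- temp_word = line_in[i] + line_in[i+1]; i and i+1 are always in range, so pyGetD is exact
      let temp_word : List Char := [PySem.List.pyGetD cs i ' ', PySem.List.pyGetD cs (i + 1) ' ']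
      let (letter_pair, temp_word, double_dict) :=
        if letter_pair = false ∧ temp_word ≠ prev_word then
          let num := (double_dict.get? temp_word).getD 0
          let double_dict := double_dict.setdefault temp_word 0
          if num > 0 then (true, temp_word, double_dict)
          else (letter_pair, temp_word, double_dict.insert temp_word (num + 1))
        else if temp_word = prev_word then (letter_pair, ([] : List Char), double_dict)
        else (letter_pair, temp_word, double_dict)
      let prev_word := temp_word
      let skip_letter :=
        if skip_letter = false ∧ i < n - 2 then
          if PySem.List.pyGetD cs i ' ' = PySem.List.pyGetD cs (i + 2) ' ' then true else skip_letter
        else skip_letter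
      ((letter_pair, prev_word, double_dict), skip_letter))
    ((false, ([] : List Char), (PySem.Dict.empty : PySem.Dict (List Char) Int)), false)
  !(st.1.1 && st.2)

-- ===== PORT B =====
def pt2_naughty_check_alt (line_in : String) : Bool :=
  let cs := line_in.toList
  let n : Int := cs.length
  let rule1 := (PySem.List.pyRange 0 (n - 1) 1).any fun i =>
    PySem.Chars.isIn (PySem.List.slice cs (some i) (some (i + 2))) (PySem.List.slice cs (some (i + 2)) none)
  let rule2 := (PySem.List.pyRange 0 (n - 2) 1).any fun i =>
    PySem.List.pyGetD cs i ' ' == PySem.List.pyGetD cs (i + 2) ' '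
  !(rule1 && rule2)

-- ===== PRECONDITION & SPEC =====
def Spec_pt2_naughty_check (line_in : String) (out : Bool) : Prop := out = pt2_naughty_check_alt line_in
instance (line_in : String) (out : Bool) : Decidable (Spec_pt2_naughty_check line_in out) := by unfold Spec_pt2_naughty_check; infer_instance

-- ===== CLAIM (what is proved, stated in full; the proofs are below) =====
def Claim_equal_pt2_naughty_check : Prop := ∀ (line_in : String), Dom_pt2_naughty_check line_in → Spec_pt2_naughty_check line_in (pt2_naughty_check line_in)

-- ===== LEMMAS AND PROOFS =====

-- the pair of characters starting at index k (out-of-range reads default; only used in range)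
def pvPair (cs : List Char) (k : ℕ) : List Char := [cs.getD k ' ', cs.getD (k + 1) ' ']

-- "some pair repeats without overlap, both occurrences starting below t"
def pvT (cs : List Char) (t : ℕ) : Prop := ∃ i j, j < t ∧ i + 2 ≤ j ∧ pvPair cs i = pvPair cs j

-- the pair-rule component of A's loop body
def pvStepA (cs : List Char) (s : Bool × List Char × PySem.Dict (List Char) Int) (i : Int) :
    Bool × List Char × PySem.Dict (List Char) Int :=
  let (letter_pair, prev_word, double_dict) := s
  let temp_word : List Char := [PySem.List.pyGetD cs i ' ', PySem.List.pyGetD cs (i + 1) ' ']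
  let (letter_pair, temp_word, double_dict) :=
    if letter_pair = false ∧ temp_word ≠ prev_word then
      let num := (double_dict.get? temp_word).getD 0
      let double_dict := double_dict.setdefault temp_word 0
      if num > 0 then (true, temp_word, double_dict)
      else (letter_pair, temp_word, double_dict.insert temp_word (num + 1))
    else if temp_word = prev_word then (letter_pair, ([] : List Char), double_dict)
    else (letter_pair, temp_word, double_dict)
  (letter_pair, temp_word, double_dict)

-- the sandwich-rule component of A's loop body
def pvStepS (cs : List Char) (n : Int) (sk : Bool) (i : Int) : Bool :=
  if sk = false ∧ i < n - 2 then
    if PySem.List.pyGetD cs i ' ' = PySem.List.pyGetD cs (i + 2) ' ' then true else sk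
  else sk

def pvFoldA (cs : List Char) (t : ℕ) : Bool × List Char × PySem.Dict (List Char) Int :=
  List.foldl (pvStepA cs) (false, [], PySem.Dict.empty) ((List.range t).map (Nat.cast : ℕ → Int))

-- invariant of A's pair-rule state while letter_pair is still false
def pvInv (cs : List Char) (t : ℕ) (prev : List Char) (dd : PySem.Dict (List Char) Int) : Prop :=
  (∀ k, k < t → dd.contains (pvPair cs k) = true) ∧
  (∀ w, dd.contains w = true → ∃ k, k < t ∧ pvPair cs k = w) ∧
  (∀ w, dd.get? w = none ∨ dd.get? w = some 1) ∧
  ((t = 0 ∧ prev = []) ∨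
   (1 ≤ t ∧ prev = pvPair cs (t - 1) ∧ (t = 1 ∨ pvPair cs (t - 1) ≠ pvPair cs (t - 2))) ∨
   (2 ≤ t ∧ prev = [] ∧ pvPair cs (t - 1) = pvPair cs (t - 2)))

lemma pvRange_sub (m c : ℕ) :
    PySem.List.pyRange 0 ((m : Int) - (c : Int)) 1 = (List.range (m - c)).map (Nat.cast : ℕ → Int) := by
  rcases Nat.lt_or_ge m c with h | h
  · have h0 : m - c = 0 := by omega
    rw [h0]
    refine List.eq_nil_iff_forall_not_mem.mpr ?_
    intro x hx
    have := PySem.List.mem_pyRange_one.mp hx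
    omega
  · have h1 : (m : Int) - (c : Int) = ((m - c : ℕ) : Int) := by omega
    rw [h1]
    exact PySem.List.pyRange_zero_natCast (m - c)

lemma pvT_succ (cs : List Char) (t : ℕ) :
    pvT cs (t + 1) ↔ pvT cs t ∨ ∃ i, i + 2 ≤ t ∧ pvPair cs i = pvPair cs t := by
  constructor
  · rintro ⟨i, j, hj, hij, he⟩
    rcases Nat.lt_succ_iff_lt_or_eq.mp hj with hj' | rfl
    · exact Or.inl ⟨i, j, hj', hij, he⟩
    · exact Or.inr ⟨i, hij, he⟩
  · rintro (⟨i, j, hj, hij, he⟩ | ⟨i, hit, he⟩)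
    · exact ⟨i, j, by omega, hij, he⟩
    · exact ⟨i, t, by omega, hit, he⟩

lemma pvStepA_true (cs : List Char) (prev : List Char) (dd : PySem.Dict (List Char) Int) (i : Int) :
    (pvStepA cs (true, prev, dd) i).1 = true := by
  simp only [pvStepA]
  split_ifs <;> rfl

lemma pvStepA_false (cs : List Char) (prev : List Char) (dd : PySem.Dict (List Char) Int) (i : Int)
    (hvals : ∀ w, dd.get? w = none ∨ dd.get? w = some 1) :
    pvStepA cs (false, prev, dd) i =
      if [PySem.List.pyGetD cs i ' ', PySem.List.pyGetD cs (i + 1) ' '] = prev then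
        (false, ([] : List Char), dd)
      else if dd.contains [PySem.List.pyGetD cs i ' ', PySem.List.pyGetD cs (i + 1) ' '] = true then
        (true, [PySem.List.pyGetD cs i ' ', PySem.List.pyGetD cs (i + 1) ' '], dd)
      else
        (false, [PySem.List.pyGetD cs i ' ', PySem.List.pyGetD cs (i + 1) ' '],
          (dd.insert [PySem.List.pyGetD cs i ' ', PySem.List.pyGetD cs (i + 1) ' '] 0).insert
            [PySem.List.pyGetD cs i ' ', PySem.List.pyGetD cs (i + 1) ' '] 1) := by
  simp only [pvStepA]
  by_cases h1 : [PySem.List.pyGetD cs i ' ', PySem.List.pyGetD cs (i + 1) ' '] = prev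
  · simp [h1]
  · by_cases h2 : dd.contains [PySem.List.pyGetD cs i ' ', PySem.List.pyGetD cs (i + 1) ' '] = true
    · have hg : dd.get? [PySem.List.pyGetD cs i ' ', PySem.List.pyGetD cs (i + 1) ' '] = some 1 := by
        rcases hvals [PySem.List.pyGetD cs i ' ', PySem.List.pyGetD cs (i + 1) ' '] with h | h
        · rw [PySem.Dict.contains_eq_isSome_get?, h] at h2
          simp at h2
        · exact h
      simp [h1, h2, hg, PySem.Dict.setdefault_of_contains dd 0 h2]
    · have h2' : dd.contains [PySem.List.pyGetD cs i ' ', PySem.List.pyGetD cs (i + 1) ' '] = false := by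
        cases h : dd.contains [PySem.List.pyGetD cs i ' ', PySem.List.pyGetD cs (i + 1) ' ']
        · rfl
        · exact absurd h h2
      have hg : dd.get? [PySem.List.pyGetD cs i ' ', PySem.List.pyGetD cs (i + 1) ' '] = none := by
        rcases hvals [PySem.List.pyGetD cs i ' ', PySem.List.pyGetD cs (i + 1) ' '] with h | h
        · exact h
        · rw [PySem.Dict.contains_eq_isSome_get?, h] at h2'
          simp at h2'
      simp [h1, h2', hg, PySem.Dict.setdefault_of_not_contains dd 0 h2']

lemma pvMainA (cs : List Char) (t : ℕ) :
    ((pvFoldA cs t).1 = true ↔ pvT cs t) ∧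
    ((pvFoldA cs t).1 = false → pvInv cs t (pvFoldA cs t).2.1 (pvFoldA cs t).2.2) := by
  induction t with
  | zero =>
    constructor
    · simp only [show (pvFoldA cs 0).1 = false from rfl, Bool.false_eq_true, false_iff]
      rintro ⟨i, j, hj, -, -⟩
      omega
    · intro _
      refine ⟨fun k hk => by omega, fun w hw => ?_, fun w => ?_, Or.inl ⟨rfl, rfl⟩⟩
      · rw [show (pvFoldA cs 0).2.2 = PySem.Dict.empty from rfl, PySem.Dict.contains_empty] at hw
        cases hw
      · left
        rw [show (pvFoldA cs 0).2.2 = PySem.Dict.empty from rfl]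
        exact PySem.Dict.get?_empty w
  | succ t ih =>
    have hstep : pvFoldA cs (t + 1) = pvStepA cs (pvFoldA cs t) ↑t := by
      simp only [pvFoldA, List.range_succ, List.map_append, List.map_cons, List.map_nil,
        List.foldl_append, List.foldl_cons, List.foldl_nil]
    rcases hE : pvFoldA cs t with ⟨lp, prev, dd⟩
    rw [hE] at ih hstep
    have e1 : t + 1 - 1 = t := by omega
    have e2 : t + 1 - 2 = t - 1 := by omega
    cases lp with
    | true =>
      have hT : pvT cs t := ih.1.mp rfl
      have h1 : (pvFoldA cs (t + 1)).1 = true := by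
        rw [hstep]
        exact pvStepA_true cs prev dd ↑t
      refine ⟨?_, ?_⟩
      · rw [h1]
        exact iff_of_true rfl ((pvT_succ cs t).mpr (Or.inl hT))
      · intro hf
        rw [h1] at hf
        cases hf
    | false =>
      have hnT : ¬ pvT cs t := fun h => by simpa using ih.1.mpr h
      obtain ⟨hI1, hI2, hI3, hPrev⟩ := ih.2 rfl
      have hPne : pvPair cs t ≠ [] := by simp [pvPair]
      have htw : [PySem.List.pyGetD cs ((t : ℕ) : Int) ' ', PySem.List.pyGetD cs (((t : ℕ) : Int) + 1) ' '] = pvPair cs t := by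
        rw [PySem.List.pyGetD_natCast, show (((t : ℕ) : Int) + 1) = (((t + 1 : ℕ)) : Int) by omega,
          PySem.List.pyGetD_natCast]
        rfl
      rw [pvStepA_false cs prev dd ↑t hI3, htw] at hstep
      by_cases hbr : pvPair cs t = prev
      · rw [if_pos hbr] at hstep
        have hpp : prev = pvPair cs (t - 1) ∧ 1 ≤ t ∧ (t = 1 ∨ pvPair cs (t - 1) ≠ pvPair cs (t - 2)) := by
          rcases hPrev with ⟨-, h0⟩ | ⟨h1, h2, h3⟩ | ⟨-, h2, -⟩
          · exact absurd (hbr.trans h0) hPne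
          · exact ⟨h2, h1, h3⟩
          · exact absurd (hbr.trans h2) hPne
        have hprev_eq : pvPair cs (t - 1) = pvPair cs t := by rw [← hpp.1, ← hbr]
        have hnT1 : ¬ pvT cs (t + 1) := by
          rw [pvT_succ]
          rintro (h | ⟨i, hit, he⟩)
          · exact hnT h
          · rcases hpp.2.2 with h1 | hne
            · omega
            · by_cases hi : i = t - 2
              · exact hne (hprev_eq.trans (hi ▸ he).symm)
              · exact hnT ⟨i, t - 1, by omega, by omega, he.trans hprev_eq.symm⟩
        refine ⟨?_, ?_⟩
        · rw [hstep]
          exact iff_of_false (by simp) hnT1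
        · intro _
          rw [hstep]
          refine ⟨?_, ?_, hI3, Or.inr (Or.inr ⟨by omega, rfl, ?_⟩)⟩
          · intro k hk
            rcases Nat.lt_succ_iff_lt_or_eq.mp hk with hk' | hEq
            · exact hI1 k hk'
            · rw [hEq, show pvPair cs t = pvPair cs (t - 1) from hprev_eq.symm]
              exact hI1 (t - 1) (by omega)
          · intro w hw
            obtain ⟨k, hk, he⟩ := hI2 w hw
            exact ⟨k, by omega, he⟩
          · rw [e1, e2]
            exact hprev_eq.symm
      · rw [if_neg hbr] at hstep
        by_cases hc : dd.contains (pvPair cs t) = true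
        · rw [if_pos hc] at hstep
          obtain ⟨k, hk, hke⟩ := hI2 _ hc
          have hT1 : pvT cs (t + 1) := by
            rw [pvT_succ]
            right
            by_cases h2 : k + 2 ≤ t
            · exact ⟨k, h2, hke⟩
            · have hk1 : k = t - 1 := by omega
              rcases hPrev with ⟨ht0, -⟩ | ⟨h1, h2', -⟩ | ⟨h1, h2', h3⟩
              · omega
              · exact absurd (h2'.trans (hk1 ▸ hke)) (Ne.symm hbr)
              · exact ⟨t - 2, by omega, h3.symm.trans (hk1 ▸ hke)⟩
          refine ⟨?_, ?_⟩
          · rw [hstep]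
            exact iff_of_true rfl hT1
          · intro hf
            rw [hstep] at hf
            cases hf
        · rw [if_neg hc] at hstep
          have hnT1 : ¬ pvT cs (t + 1) := by
            rw [pvT_succ]
            rintro (h | ⟨i, hit, he⟩)
            · exact hnT h
            · exact hc (by rw [← he]; exact hI1 i (by omega))
          refine ⟨by rw [hstep]; exact iff_of_false (by simp) hnT1, ?_⟩
          intro _
          rw [hstep]
          refine ⟨?_, ?_, ?_, ?_⟩
          · intro k hk
            rw [PySem.Dict.contains_insert, PySem.Dict.contains_insert]
            rcases Nat.lt_succ_iff_lt_or_eq.mp hk with hk' | hEq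
            · rw [hI1 k hk']
              simp
            · rw [hEq]
              simp
          · intro w hw
            rw [PySem.Dict.contains_insert, PySem.Dict.contains_insert] at hw
            simp only [Bool.or_eq_true, beq_iff_eq] at hw
            rcases hw with h | h | h
            · exact ⟨t, by omega, h.symm⟩
            · exact ⟨t, by omega, h.symm⟩
            · obtain ⟨k, hk, he⟩ := hI2 w h
              exact ⟨k, by omega, he⟩
          · intro w
            rw [PySem.Dict.get?_insert, PySem.Dict.get?_insert]
            by_cases hwt : w = pvPair cs t
            · simp [hwt]
            · simp only [hwt, if_false]
              exact hI3 w
          · right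
            left
            refine ⟨by omega, by rw [e1], ?_⟩
            rcases Nat.eq_zero_or_pos t with ht0 | ht0
            · left
              omega
            · right
              rw [e1, e2]
              intro heq
              rcases hPrev with ⟨h1, -⟩ | ⟨h1, h2, -⟩ | ⟨h1, h2, h3⟩
              · omega
              · exact hbr (heq.trans h2.symm)
              · refine hc ?_
                rw [show pvPair cs t = pvPair cs (t - 2) from heq.trans h3]
                exact hI1 (t - 2) (by omega)

lemma pvTake2 (cs : List Char) (k : ℕ) (h : k + 1 < cs.length) :
    (cs.drop k).take 2 = pvPair cs k := by
  have h1 : k < cs.length := by omega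
  rw [List.drop_eq_getElem_cons h1]
  show _ :: List.take 1 _ = _
  rw [List.take_one_drop_eq_of_lt_length h]
  simp [pvPair, List.getD_eq_getElem?_getD, List.getElem?_eq_getElem h1, List.getElem?_eq_getElem h]

lemma pvGetD_drop (cs : List Char) (j k : ℕ) (d : Char) :
    (cs.drop j).getD k d = cs.getD (j + k) d := by
  simp [List.getD_eq_getElem?_getD, List.getElem?_drop]

lemma pvPrefix2 (a b : Char) (m : List Char) :
    [a, b] <+: m ↔ 2 ≤ m.length ∧ m.getD 0 ' ' = a ∧ m.getD 1 ' ' = b := by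
  rcases m with _ | ⟨x, _ | ⟨y, rest⟩⟩
  · simp
  · simp [List.cons_prefix_cons]
  · simp [List.cons_prefix_cons, eq_comm]

lemma pvRule1_iff (cs : List Char) :
    ((List.range (cs.length - 1)).any fun (k : ℕ) =>
        PySem.Chars.isIn (PySem.List.slice cs (some (k : Int)) (some ((k : Int) + 2)))
          (PySem.List.slice cs (some ((k : Int) + 2)) none)) = true ↔ pvT cs (cs.length - 1) := by
  have hs1 : ∀ k : ℕ, PySem.List.slice cs (some (k : Int)) (some ((k : Int) + 2)) = (cs.drop k).take 2 := by
    intro k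
    rw [show ((k : Int) + 2) = ((k : ℕ) : Int) + ((2 : ℕ) : Int) by norm_num]
    exact PySem.List.slice_natCast_add cs k 2
  have hs2 : ∀ k : ℕ, PySem.List.slice cs (some ((k : Int) + 2)) none = cs.drop (k + 2) := by
    intro k
    rw [show ((k : Int) + 2) = (((k + 2 : ℕ)) : Int) by omega]
    exact PySem.List.slice_from_natCast cs (k + 2)
  simp only [List.any_eq_true, List.mem_range]
  constructor
  · rintro ⟨k, hk, hIn⟩
    rw [hs1, hs2, pvTake2 cs k (by omega)] at hIn
    obtain ⟨j, hpre⟩ := (PySem.Chars.exists_prefix_drop_iff_isIn _ _).mpr hIn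
    rw [List.drop_drop] at hpre
    simp only [pvPair] at hpre
    obtain ⟨hlen, h0, h1⟩ := (pvPrefix2 _ _ _).mp hpre
    rw [List.length_drop] at hlen
    rw [pvGetD_drop] at h0 h1
    simp only [Nat.add_zero] at h0
    refine ⟨k, k + 2 + j, by omega, by omega, ?_⟩
    simp only [pvPair]
    rw [h0, h1]
  · rintro ⟨i, j, hj, hij, he⟩
    refine ⟨i, by omega, ?_⟩
    rw [hs1, hs2, pvTake2 cs i (by omega)]
    apply (PySem.Chars.exists_prefix_drop_iff_isIn _ _).mp
    refine ⟨j - (i + 2), ?_⟩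
    rw [List.drop_drop, show i + 2 + (j - (i + 2)) = j by omega]
    simp only [pvPair, List.cons.injEq, and_true] at he
    simp only [pvPair]
    apply (pvPrefix2 _ _ _).mpr
    refine ⟨by rw [List.length_drop]; omega, ?_, ?_⟩
    · rw [pvGetD_drop]
      simpa using he.1.symm
    · rw [pvGetD_drop]
      exact he.2.symm

lemma pvLatchS (cs : List Char) (n : Int) (l : List ℕ) (b : Bool) :
    List.foldl (pvStepS cs n) b (l.map (Nat.cast : ℕ → Int)) =
      (b || l.any fun k => decide ((k : Int) < n - 2 ∧ cs.getD k ' ' = cs.getD (k + 2) ' ')) := by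
  induction l generalizing b with
  | nil => simp
  | cons k l ih =>
    have h1 : PySem.List.pyGetD cs (↑k) ' ' = cs.getD k ' ' := PySem.List.pyGetD_natCast cs k ' '
    have h2 : PySem.List.pyGetD cs ((k : Int) + 2) ' ' = cs.getD (k + 2) ' ' := by
      have h3 : ((k : Int) + 2) = ((k + 2 : ℕ) : Int) := by omega
      rw [h3, PySem.List.pyGetD_natCast]
    rw [List.map_cons, List.foldl_cons, ih, List.any_cons]
    cases b with
    | true => simp [pvStepS]
    | false =>
      unfold pvStepS
      rw [h1, h2]
      by_cases hP : (k : Int) < n - 2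
      · simp [hP]
      · simp [hP]

lemma pvSkip_eq_rule2 (cs : List Char) :
    ((List.range (cs.length - 1)).any fun (k : ℕ) =>
        decide ((k : Int) < (cs.length : Int) - 2 ∧ cs.getD k ' ' = cs.getD (k + 2) ' ')) =
      ((List.range (cs.length - 2)).any fun (k : ℕ) =>
        PySem.List.pyGetD cs (k : Int) ' ' == PySem.List.pyGetD cs ((k : Int) + 2) ' ') := by
  have hG : ∀ k : ℕ, (PySem.List.pyGetD cs (k : Int) ' ' == PySem.List.pyGetD cs ((k : Int) + 2) ' ') =
      (cs.getD k ' ' == cs.getD (k + 2) ' ') := by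
    intro k
    rw [PySem.List.pyGetD_natCast, show ((k : Int) + 2) = ((k + 2 : ℕ) : Int) by omega,
      PySem.List.pyGetD_natCast]
  rw [Bool.eq_iff_iff]
  simp only [List.any_eq_true, List.mem_range, decide_eq_true_eq, hG, beq_iff_eq]
  constructor
  · rintro ⟨k, hk, hkn, he⟩
    exact ⟨k, by omega, he⟩
  · rintro ⟨k, hk, he⟩
    exact ⟨k, by omega, by omega, he⟩

lemma pvMain (s : String) : pt2_naughty_check s = pt2_naughty_check_alt s := by
  have hc1 : ((s.toList.length : Int) - 1) = ((s.toList.length : Int) - ((1 : ℕ) : Int)) := by norm_num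
  have hc2 : ((s.toList.length : Int) - 2) = ((s.toList.length : Int) - ((2 : ℕ) : Int)) := by norm_num
  have hA : pt2_naughty_check s =
      !(((PySem.List.pyRange 0 ((s.toList.length : Int) - 1) 1).foldl
            (fun st i => (pvStepA s.toList st.1 i, pvStepS s.toList (s.toList.length : Int) st.2 i))
            ((false, ([] : List Char), (PySem.Dict.empty : PySem.Dict (List Char) Int)), false)).1.1 &&
        ((PySem.List.pyRange 0 ((s.toList.length : Int) - 1) 1).foldl
            (fun st i => (pvStepA s.toList st.1 i, pvStepS s.toList (s.toList.length : Int) st.2 i))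
            ((false, ([] : List Char), (PySem.Dict.empty : PySem.Dict (List Char) Int)), false)).2) := rfl
  rw [hc1, pvRange_sub, PySem.List.foldl_prod_mk] at hA
  have hB : pt2_naughty_check_alt s =
      !(((PySem.List.pyRange 0 ((s.toList.length : Int) - 1) 1).any fun i =>
          PySem.Chars.isIn (PySem.List.slice s.toList (some i) (some (i + 2)))
            (PySem.List.slice s.toList (some (i + 2)) none)) &&
        ((PySem.List.pyRange 0 ((s.toList.length : Int) - 2) 1).any fun i =>
          PySem.List.pyGetD s.toList i ' ' == PySem.List.pyGetD s.toList (i + 2) ' ')) := rfl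
  rw [hc1, hc2, pvRange_sub, pvRange_sub, List.any_map, List.any_map] at hB
  rw [hA, hB]
  congr 1
  congr 1
  · rw [Bool.eq_iff_iff]
    exact (pvMainA s.toList (s.toList.length - 1)).1.trans (pvRule1_iff s.toList).symm
  · exact (pvLatchS s.toList (s.toList.length : Int) (List.range (s.toList.length - 1)) false).trans
      ((Bool.false_or _).trans (pvSkip_eq_rule2 s.toList))

-- ===== VERDICT (by name: the statement is the Claim_ definition above) =====
theorem pt2_naughty_check_spec : Claim_equal_pt2_naughty_check := by
  intro line_in _
  unfold Spec_pt2_naughty_check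
  exact pvMain line_in
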